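-- pv_equiv track=rewrite | github.com/PeifengJi/metaSort_long | metaSort/libs/simplify.py | getFirstXMax
-- ===== SOURCE A (Python) =====
-- import math
--
-- def setXMax(xMax, binWidth):
--     return int((math.floor(xMax / binWidth)) * binWidth)
--
-- def getFirstXMax(vector, binWidth):
--     maxCov = subMaxCov = 0
--     for i in vector:
--         if i > maxCov:
--             subMaxCov = maxCov
--             maxCov = i
--
--     xMax = setXMax(subMaxCov, binWidth) + binWidth * 5
--     return xMax
-- ===== SOURCE B (Python) =====
-- def getFirstXMax(vector, binWidth):
--     # max/index/slice decomposition instead of the record-tracking loop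
--     maxCov = max(vector, default=0)
--     if maxCov > 0:
--         first = vector.index(maxCov)
--         sub = max([0] + vector[:first])
--     else:
--         sub = 0
--     return (sub // binWidth) * binWidth + binWidth * 5
-- ===== Notes on version B (the rewrite author's own statement) =====
-- stated objective: simpler
-- what changed: Replaces A's single record-tracking loop over (maxCov, subMaxCov) by a direct decomposition: take max(vector, default=0), and if positive take the max (clamped at 0) of the prefix before its first occurrence via index() and a slice.
import Mathlib
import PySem

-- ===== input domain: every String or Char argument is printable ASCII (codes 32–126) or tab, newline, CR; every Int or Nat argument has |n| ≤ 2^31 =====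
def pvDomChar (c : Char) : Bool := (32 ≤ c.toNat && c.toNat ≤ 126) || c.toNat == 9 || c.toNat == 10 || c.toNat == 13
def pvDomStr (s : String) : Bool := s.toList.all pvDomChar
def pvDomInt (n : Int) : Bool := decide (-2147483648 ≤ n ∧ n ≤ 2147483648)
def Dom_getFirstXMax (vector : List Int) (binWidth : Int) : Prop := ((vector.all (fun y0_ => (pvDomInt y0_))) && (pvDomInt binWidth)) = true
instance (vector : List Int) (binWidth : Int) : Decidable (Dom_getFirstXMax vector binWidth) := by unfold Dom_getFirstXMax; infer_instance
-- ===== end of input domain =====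

-- B replaces A's record-tracking loop by max / index / slice primitives (objective: simpler).

-- ===== PORT A =====
-- math.floor(xMax / binWidth) is ported as integer floor division: exact on Dom,
-- where |xMax|, |binWidth| ≤ 2^31 keep the float quotient from crossing an integer.
def setXMax (xMax : Int) (binWidth : Int) : Int :=
  PySem.Int.floordiv xMax binWidth * binWidth

def getFirstXMax (vector : List Int) (binWidth : Int) : Int :=
  let st := vector.foldl (fun (p : Int × Int) i => if i > p.1 then (i, p.1) else p) (0, 0)
  setXMax st.2 binWidth + binWidth * 5

-- ===== PORT B =====
def getFirstXMax_alt (vector : List Int) (binWidth : Int) : Int :=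
  let maxCov := (PySem.List.max? vector (fun x => x)).getD 0
  let sub :=
    if maxCov > 0 then
      -- vector.index(maxCov): 'some' is guaranteed here (maxCov ∈ vector when maxCov > 0)
      let first := ((PySem.List.index? vector maxCov).getD 0 : Nat)
      (PySem.List.max? (0 :: PySem.List.slice vector none (some (first : Int))) (fun x => x)).getD 0
    else 0
  PySem.Int.floordiv sub binWidth * binWidth + binWidth * 5

-- ===== PRECONDITION & SPEC =====
-- Pre_ excludes binWidth = 0, on which both Pythons raise ZeroDivisionError.
def Pre_getFirstXMax (vector : List Int) (binWidth : Int) : Prop := binWidth ≠ 0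
instance (vector : List Int) (binWidth : Int) : Decidable (Pre_getFirstXMax vector binWidth) := by unfold Pre_getFirstXMax; infer_instance
def pvWitness_getFirstXMax : List Int × Int := ([3, 1, 2], 2)

def Spec_getFirstXMax (vector : List Int) (binWidth : Int) (out : Int) : Prop := out = getFirstXMax_alt vector binWidth
instance (vector : List Int) (binWidth : Int) (out : Int) : Decidable (Spec_getFirstXMax vector binWidth out) := by unfold Spec_getFirstXMax; infer_instance

-- ===== CLAIM (what is proved, stated in full; the proofs are below) =====
def Claim_equal_getFirstXMax : Prop := ∀ (vector : List Int) (binWidth : Int), Dom_getFirstXMax vector binWidth → Pre_getFirstXMax vector binWidth → Spec_getFirstXMax vector binWidth (getFirstXMax vector binWidth)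

-- ===== LEMMAS AND PROOFS =====

-- B's subMaxCov value, abbreviated for the proofs
def subB (l : List Int) : Int :=
  let maxCov := (PySem.List.max? l (fun x => x)).getD 0
  if maxCov > 0 then
    (PySem.List.max? (0 :: PySem.List.slice l none (some (((PySem.List.index? l maxCov).getD 0 : Nat) : Int))) (fun x => x)).getD 0
  else 0

lemma subB_eq (l : List Int) (b : Int) :
    getFirstXMax_alt l b = PySem.Int.floordiv (subB l) b * b + b * 5 := by
  simp [getFirstXMax_alt, subB]

lemma foldl_max_max (t : List Int) : ∀ a b : Int, List.foldl max (max a b) t = max a (List.foldl max b t) := by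
  induction t with
  | nil => intro a b; rfl
  | cons x xs ih =>
    intro a b
    simp only [List.foldl_cons, max_assoc]
    exact ih a (max b x)

-- B's maxCov against A's clamped running max
lemma maxCov_char (l : List Int) :
    max 0 ((PySem.List.max? l (fun x => x)).getD 0) = List.foldl max 0 l := by
  cases l with
  | nil => simp [PySem.List.max?]
  | cons x t =>
    rw [PySem.List.max?_id_cons]
    simp only [Option.getD_some, List.foldl_cons]
    exact (foldl_max_max t 0 x).symm

-- the key invariant: A's pair fold computes (running max with baseline 0, B's sub value)
lemma fold_char (l : List Int) :
    l.foldl (fun (p : Int × Int) i => if i > p.1 then (i, p.1) else p) (0, 0)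
      = (List.foldl max 0 l, subB l) := by
  induction l using List.reverseRecOn with
  | nil => simp [subB, PySem.List.max?]
  | append_singleton l y ih =>
    rw [List.foldl_append, List.foldl_append, ih]
    simp only [List.foldl_cons, List.foldl_nil]
    have hM := maxCov_char l
    have hM' := maxCov_char (l ++ [y])
    have hfold0 : (0 : Int) ≤ List.foldl max 0 l := (PySem.List.le_foldl_max l 0).1
    have hmem : ∀ x ∈ l, x ≤ List.foldl max 0 l := (PySem.List.le_foldl_max l 0).2
    by_cases hy : y > List.foldl max 0 l
    · -- new record: y becomes the max, its first occurrence is the appended one, sub = old running max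
      rw [if_pos hy]
      have hy0 : (0 : Int) < y := lt_of_le_of_lt hfold0 hy
      have hynotin : y ∉ l := fun h => absurd (hmem y h) (not_le.mpr hy)
      have hMyv : (PySem.List.max? (l ++ [y]) (fun x => x)).getD 0 = y := by
        cases l with
        | nil => rw [List.nil_append, PySem.List.max?_id_cons]; rfl
        | cons x t =>
          rw [List.cons_append, PySem.List.max?_id_cons, Option.getD_some, List.foldl_append]
          have h1 : List.foldl max x t ≤ List.foldl max 0 (x :: t) := by
            have h2 := maxCov_char (x :: t)
            rw [PySem.List.max?_id_cons, Option.getD_some] at h2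
            calc List.foldl max x t ≤ max 0 (List.foldl max x t) := le_max_right _ _
              _ = _ := h2
          simp only [List.foldl_cons, List.foldl_nil]
          exact max_eq_right (le_of_lt (lt_of_le_of_lt h1 hy))
      simp only [Prod.mk.injEq]
      constructor
      · exact (max_eq_right (le_of_lt hy)).symm
      · show List.foldl max 0 l = subB (l ++ [y])
        unfold subB
        rw [hMyv, if_pos hy0, PySem.List.index?_append_singleton_self l y hynotin,
            Option.getD_some, PySem.List.slice_to_natCast, List.take_left,
            PySem.List.max?_id_cons, Option.getD_some]
    · -- no new record: max, first occurrence and sub are all unchanged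
      rw [if_neg hy]
      have hyle : y ≤ List.foldl max 0 l := not_lt.mp hy
      have hfst : List.foldl max 0 l = max (List.foldl max 0 l) y := (max_eq_left hyle).symm
      have hsnd : subB l = subB (l ++ [y]) := by
        by_cases hpos : 0 < List.foldl max 0 l
        · -- the old positive max is still the max, and still at its old first position
          have hMl : (PySem.List.max? l (fun x => x)).getD 0 = List.foldl max 0 l := by
            rcases le_total ((PySem.List.max? l (fun x => x)).getD 0) 0 with h | h
            · rw [max_eq_left h] at hM; omega
            · rw [max_eq_right h] at hM; exact hM
          have hlne : l ≠ [] := by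
            intro h; rw [h] at hpos; exact lt_irrefl 0 hpos
          obtain ⟨x, t, rfl⟩ := List.exists_cons_of_ne_nil hlne
          have hsome : PySem.List.max? (x :: t) (fun x => x)
              = some ((PySem.List.max? (x :: t) (fun x => x)).getD 0) := by
            rw [PySem.List.max?_id_cons]; rfl
          have hmemM : (PySem.List.max? (x :: t) (fun x => x)).getD 0 ∈ x :: t :=
            PySem.List.max?_mem hsome
          have hMy : (PySem.List.max? ((x :: t) ++ [y]) (fun x => x)).getD 0
              = (PySem.List.max? (x :: t) (fun x => x)).getD 0 := by
            rw [List.cons_append, PySem.List.max?_id_cons, Option.getD_some, List.foldl_append]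
            simp only [List.foldl_cons, List.foldl_nil]
            rw [PySem.List.max?_id_cons, Option.getD_some] at hMl ⊢
            rw [hMl]
            exact max_eq_left hyle
          unfold subB
          rw [hMy, hMl, if_pos hpos, if_pos hpos]
          rw [← hMl, PySem.List.index?_append_of_mem [y] hmemM]
          rcases hidx : PySem.List.index? (x :: t) ((PySem.List.max? (x :: t) (fun x => x)).getD 0)
            with _ | k
          · rw [PySem.List.index?_eq_none_iff] at hidx; exact absurd hmemM hidx
          · obtain ⟨hk, -, -⟩ := PySem.List.getElem_of_index?_eq_some hidx
            rw [Option.getD_some, PySem.List.slice_to_natCast, PySem.List.slice_to_natCast,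
                List.take_append_of_le_length (le_of_lt hk)]
        · -- everything is nonpositive: both sub values are the 0 baseline
          have h0 : List.foldl max 0 l = 0 := le_antisymm (not_lt.mp hpos) hfold0
          have hMl0 : (PySem.List.max? l (fun x => x)).getD 0 ≤ 0 := by
            rw [h0] at hM
            rcases le_total ((PySem.List.max? l (fun x => x)).getD 0) 0 with h | h
            · exact h
            · rw [max_eq_right h] at hM; omega
          have hMy0 : (PySem.List.max? (l ++ [y]) (fun x => x)).getD 0 ≤ 0 := by
            have : List.foldl max 0 (l ++ [y]) = 0 := by
              rw [List.foldl_append, h0]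
              simp only [List.foldl_cons, List.foldl_nil]
              exact max_eq_left (h0 ▸ hyle)
            rw [this] at hM'
            rcases le_total ((PySem.List.max? (l ++ [y]) (fun x => x)).getD 0) 0 with h | h
            · exact h
            · rw [max_eq_right h] at hM'; omega
          unfold subB
          rw [if_neg (not_lt.mpr hMl0), if_neg (not_lt.mpr hMy0)]
      rw [← hfst, ← hsnd]

-- ===== VERDICT (by name: the statement is the Claim_ definition above) =====
theorem getFirstXMax_spec : Claim_equal_getFirstXMax := by
  intro v b _ _
  unfold Spec_getFirstXMax
  rw [subB_eq]
  unfold getFirstXMax setXMax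
  rw [fold_char]
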